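-- pv_equiv track=rewrite | github.com/Dongli99/MatrixCalc | Matrix.py | _is_addable
-- ===== SOURCE A (Python) =====
-- def _is_addable(m1, m2):
--     # check if two matrixes are addable
--     if not all(isinstance(row, list) for row in m1) or not all(isinstance(row, list) for row in m2):
--         return False
--     if len(m1) != len(m2):
--         return False
--     if any(len(row) != len(m2[0]) for row in m1) or any(len(row) != len(m1[0]) for row in m2):
--         return False
--     return True
-- ===== SOURCE B (Python) =====
-- def _is_addable(m1, m2):
--     # check if two matrixes are addable
--     if not all(isinstance(row, list) for row in m1) or not all(isinstance(row, list) for row in m2):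
--         return False
--     # single simultaneous pass over both matrices: rows must pair up with equal
--     # lengths, and every length must match the width seen so far
--     width = None
--     i = 0
--     while True:
--         if i >= len(m1) and i >= len(m2):
--             return True
--         if i >= len(m1) or i >= len(m2):
--             return False
--         if len(m1[i]) != len(m2[i]):
--             return False
--         if width is not None and len(m1[i]) != width:
--             return False
--         width = len(m1[i])
--         i += 1
-- ===== Notes on version B (the rewrite author's own statement) =====
-- stated objective: alternative
-- what changed: B replaces A's staged checks (length comparison then two cross-scans of every row length against the other matrix's first row) by one simultaneous pass over both matrices that pairs up rows, carries the width seen so far as an accumulator and short-circuits on the first mismatch; it never indexes m1[0]/m2[0].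
import Mathlib
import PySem

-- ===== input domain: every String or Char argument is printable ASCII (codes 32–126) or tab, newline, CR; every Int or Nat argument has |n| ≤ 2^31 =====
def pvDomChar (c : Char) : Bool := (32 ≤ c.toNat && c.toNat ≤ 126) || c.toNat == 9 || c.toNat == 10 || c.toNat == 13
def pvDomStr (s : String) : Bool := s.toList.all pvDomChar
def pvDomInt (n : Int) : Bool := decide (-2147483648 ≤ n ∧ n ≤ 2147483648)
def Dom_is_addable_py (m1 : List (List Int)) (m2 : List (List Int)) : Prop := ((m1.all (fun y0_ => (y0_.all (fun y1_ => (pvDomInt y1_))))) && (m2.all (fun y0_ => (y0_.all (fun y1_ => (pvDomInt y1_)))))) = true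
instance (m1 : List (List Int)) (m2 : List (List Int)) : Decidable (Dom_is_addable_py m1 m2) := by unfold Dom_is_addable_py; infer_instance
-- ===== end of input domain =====

-- B replaces A's staged checks by one simultaneous pass over both matrices, pairing up rows,
-- carrying the width seen so far and short-circuiting on the first mismatch (objective: alternative).

-- ===== PORT A =====
-- Literal port of A. Under the type List (List Int) every row IS a list, so the
-- isinstance guard is the vacuous all-true test, kept in place. `m2.headD []` is exact
-- for Python's m2[0] here: the generator evaluates m2[0] only when m1 is nonempty, and the
-- preceding length guard then makes m2 nonempty too (symmetrically for m1[0]).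
def is_addable_py (m1 : List (List Int)) (m2 : List (List Int)) : Bool :=
  if !(m1.all fun _row => true) || !(m2.all fun _row => true) then false
  else if m1.length ≠ m2.length then false
  else if (m1.any fun row => row.length ≠ (m2.headD []).length)
          || (m2.any fun row => row.length ≠ (m1.headD []).length) then false
  else true

-- ===== PORT B =====
-- Port of Source B's simultaneous pass: the while-loop over i walks both matrices in step,
-- rendered as the corresponding structural recursion over the two lists (iteration i =
-- step on the i-th tails); width : Option Nat is Python's None/int accumulator.
def is_addable_walk : List (List Int) → List (List Int) → Option Nat → Bool
  | [], [], _ => true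
  | [], _ :: _, _ => false
  | _ :: _, [], _ => false
  | r1 :: a, r2 :: b, width =>
    if r1.length ≠ r2.length then false
    else if (match width with | some w => r1.length != w | none => false) then false
    else is_addable_walk a b (some r1.length)

-- Port of Source B (same vacuous isinstance guard, then the simultaneous pass).
def is_addable_py_alt (m1 : List (List Int)) (m2 : List (List Int)) : Bool :=
  if !(m1.all fun _row => true) || !(m2.all fun _row => true) then false
  else is_addable_walk m1 m2 none

-- ===== PRECONDITION & SPEC =====
def Spec_is_addable_py (m1 : List (List Int)) (m2 : List (List Int)) (out : Bool) : Prop := out = is_addable_py_alt m1 m2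
instance (m1 : List (List Int)) (m2 : List (List Int)) (out : Bool) : Decidable (Spec_is_addable_py m1 m2 out) := by unfold Spec_is_addable_py; infer_instance

-- ===== CLAIM (what is proved, stated in full; the proofs are below) =====
def Claim_equal_is_addable_py : Prop := ∀ (m1 : List (List Int)) (m2 : List (List Int)), Dom_is_addable_py m1 m2 → Spec_is_addable_py m1 m2 (is_addable_py m1 m2)

-- ===== LEMMAS AND PROOFS =====

-- characterization of the walk: rows pair up with equal lengths and all lengths match the anchor
lemma walk_true (a b : List (List Int)) (w : Option Nat) :
    is_addable_walk a b w = true ↔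
      a.map List.length = b.map List.length ∧
      ∀ r ∈ a, r.length = w.getD ((a.headD []).length) := by
  induction a generalizing b w with
  | nil =>
    cases b <;> simp [is_addable_walk]
  | cons r1 a ih =>
    cases b with
    | nil => simp [is_addable_walk]
    | cons r2 b =>
      simp only [is_addable_walk]
      split_ifs with h1 h2
      · simp [h1]
      · cases w with
        | none => simp at h2
        | some n =>
          simp only [bne_iff_ne, ne_eq] at h2
          constructor
          · intro h; simp at h
          · rintro ⟨_, hall⟩
            exact h2 (by simpa using hall r1 (List.mem_cons_self ..))
      · simp only [not_not] at h1
        have hw : ∀ n, w = some n → r1.length = n := by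
          intro n hn; subst hn
          simpa using h2
        rw [ih b (some r1.length)]
        constructor
        · rintro ⟨hmap, hall⟩
          refine ⟨by simp [hmap, h1], ?_⟩
          intro r hr
          rcases List.mem_cons.mp hr with rfl | hr
          · cases w with
            | none => simp
            | some n => simpa using hw n rfl
          · have := hall r hr
            simp only [Option.getD_some] at this
            cases w with
            | none => simp [this]
            | some n => simpa [this] using hw n rfl
        · rintro ⟨hmap, hall⟩
          have hr1 : r1.length = w.getD r1.length := by
            simpa using hall r1 (List.mem_cons_self ..)
          have hmap' : r1.length = r2.length ∧ List.map List.length a = List.map List.length b := by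
            simpa using hmap
          refine ⟨hmap'.2, ?_⟩
          intro r hr
          have := hall r (List.mem_cons_of_mem _ hr)
          simp only [List.headD_cons] at this hr1
          simpa [Option.getD_some] using this.trans hr1.symm

lemma headD_mem' (m : List (List Int)) (h : m ≠ []) : m.headD [] ∈ m := by
  cases m <;> simp_all

-- ===== VERDICT (by name: the statement is the Claim_ definition above) =====
theorem is_addable_py_spec : Claim_equal_is_addable_py := by
  intro m1 m2 _
  unfold Spec_is_addable_py is_addable_py is_addable_py_alt
  have hg : ∀ (m : List (List Int)), (m.all fun _row => true) = true := by
    intro m; simp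
  rw [hg, hg]
  simp only [Bool.not_true, Bool.or_self, Bool.false_eq_true, if_false]
  rw [Bool.eq_iff_iff, walk_true]
  split_ifs with hlen hany
  · -- lengths differ ⇒ walk's map condition fails
    simp only [false_iff, not_and]
    intro hmap
    exact absurd (by simpa using congrArg List.length hmap) hlen
  · -- a cross-check failed ⇒ walk fails
    simp only [false_iff, not_and]
    rintro hmap hall
    simp only [not_not] at hlen
    rw [Bool.or_eq_true, List.any_eq_true, List.any_eq_true] at hany
    rcases hany with ⟨r, hr, hne⟩ | ⟨r, hr, hne⟩
    · -- some row of m1 mismatches m2[0]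
      simp only [decide_eq_true_eq] at hne
      have hm1 : m1 ≠ [] := by rintro rfl; simp at hr
      have hm2 : m2 ≠ [] := by
        rintro rfl; simp at hlen; exact hm1 hlen
      have h2 : (m2.headD []).length ∈ m2.map List.length :=
        List.mem_map_of_mem (headD_mem' m2 hm2)
      rw [← hmap] at h2
      obtain ⟨r', hr', hlen'⟩ := List.mem_map.mp h2
      have := (hall r hr).trans (hall r' hr').symm
      exact hne (this.trans hlen')
    · -- some row of m2 mismatches m1[0]
      simp only [decide_eq_true_eq] at hne
      have hm2 : m2 ≠ [] := by rintro rfl; simp at hr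
      have hm1 : m1 ≠ [] := by
        rintro rfl; simp at hlen; exact hm2 (List.length_eq_zero_iff.mp hlen.symm)
      have hrm : r.length ∈ m2.map List.length := List.mem_map_of_mem hr
      rw [← hmap] at hrm
      obtain ⟨r', hr', hlen'⟩ := List.mem_map.mp hrm
      have := (hall r' hr').trans (hall (m1.headD []) (headD_mem' m1 hm1)).symm
      exact hne (hlen' ▸ this)
  · -- all of A's checks passed ⇒ walk succeeds
    simp only [true_iff]
    simp only [not_not] at hlen
    simp only [Bool.or_eq_true, List.any_eq_true, decide_eq_true_eq, ne_eq, not_or,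
      not_exists, not_and, not_not] at hany
    obtain ⟨h1, h2⟩ := hany
    constructor
    · apply List.ext_getElem (by simpa using hlen)
      intro i hi1 hi2
      simp only [List.length_map] at hi1 hi2
      simp only [List.getElem_map]
      rcases List.eq_nil_or_concat m1 with rfl | _
      · simp at hi1
      have hm1 : m1 ≠ [] := by rintro rfl; simp at hi1
      have hm2 : m2 ≠ [] := by rintro rfl; simp at hi2
      have e1 := h1 m1[i] (List.getElem_mem hi1)
      have e2 := h2 m2[i] (List.getElem_mem hi2)
      have e3 := h1 (m1.headD []) (headD_mem' m1 hm1)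
      omega
    · intro r hr
      have hm1 : m1 ≠ [] := by rintro rfl; simp at hr
      have e3 := h1 (m1.headD []) (headD_mem' m1 hm1)
      have := h1 r hr
      simp only [Option.getD_none]
      omega
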